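-- pv_equiv track=rewrite | github.com/Herzallah15/PyTorTractor | Source/SubDiagraming_jit.py | NormalizePattern
-- ===== SOURCE A (Python) =====
-- def NormalizePattern(Mode_Indices ,Ps_In, Ps_Out):
--     ain = {}
--     counter = 0
--     M_idx = ''
--     Ps_In_idx = ''
--     Ps_Out_idx = ''
--     for i in Mode_Indices:
--         if i not in ain:
--             ain[i] = chr(65 + counter)
--             counter += 1
--         M_idx += ain[i]
--     for i in Ps_In:
--         if i not in ain:
--             ain[i] = chr(65 + counter)
--             counter += 1
--         Ps_In_idx += ain[i]
--     for i in Ps_Out: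
--         if i not in ain:
--             ain[i] = chr(65 + counter)
--             counter += 1
--         Ps_Out_idx += ain[i]
--     return f'{M_idx},{Ps_In_idx}->{Ps_Out_idx}'
-- ===== SOURCE B (Python) =====
-- def NormalizePattern(Mode_Indices, Ps_In, Ps_Out):
--     m, p, q = list(Mode_Indices), list(Ps_In), list(Ps_Out)
--     concat = m + p + q
--     # sort-then-rank: first-occurrence positions (reverse sweep overwrites later ones),
--     # sorted once; rank of the position gives the letter — no incremental counter
--     first = {x: j for j, x in reversed(list(enumerate(concat)))}
--     rank = {pos: r for r, pos in enumerate(sorted(first.values()))}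
--     def lab(seq):
--         return ''.join(chr(65 + rank[first[i]]) for i in seq)
--     return f'{lab(m)},{lab(p)}->{lab(q)}'
-- ===== Notes on version B (the rewrite author's own statement) =====
-- stated objective: alternative
-- what changed: B drops A's incremental letter counter and guarded dict inserts: a reverse enumerate sweep (later overwrites) leaves each index's first-occurrence position, those positions are sorted once, and each index's letter is A + the rank of its position in that sorted list.
import Mathlib
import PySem

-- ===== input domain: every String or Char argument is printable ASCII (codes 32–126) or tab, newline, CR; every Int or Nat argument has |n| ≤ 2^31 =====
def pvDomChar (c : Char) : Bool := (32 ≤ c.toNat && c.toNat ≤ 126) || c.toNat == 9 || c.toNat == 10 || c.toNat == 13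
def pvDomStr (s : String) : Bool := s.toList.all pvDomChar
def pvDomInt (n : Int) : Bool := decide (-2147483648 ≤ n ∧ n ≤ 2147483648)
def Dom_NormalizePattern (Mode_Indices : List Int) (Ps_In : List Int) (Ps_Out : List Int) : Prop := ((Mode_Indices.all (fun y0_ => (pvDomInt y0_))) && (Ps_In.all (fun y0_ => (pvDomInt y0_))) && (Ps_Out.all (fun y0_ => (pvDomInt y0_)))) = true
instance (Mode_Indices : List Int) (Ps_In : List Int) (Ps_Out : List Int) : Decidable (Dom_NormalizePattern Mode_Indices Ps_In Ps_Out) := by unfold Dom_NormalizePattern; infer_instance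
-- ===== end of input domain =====

-- B replaces A's incremental counter/guarded-insert dict with sort-then-rank: a reverse
-- enumerate sweep leaves first-occurrence positions, sorted once; objective: alternative.

-- ===== PORT A =====
-- one loop step of A: guarded insert with an explicit counter, then append the looked-up letter
def pvStepA (st : PySem.Dict Int String × Nat × String) (i : Int) :
    PySem.Dict Int String × Nat × String :=
  let (d, c, s) := st
  let (d', c') :=
    if d.contains i then (d, c)
    else (d.insert i (String.singleton (Char.ofNat (65 + c))), c + 1)
  (d', c', s ++ d'.getD i "")

def NormalizePattern (Mode_Indices : List Int) (Ps_In : List Int) (Ps_Out : List Int) : String :=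
  let (d1, c1, mIdx) := Mode_Indices.foldl pvStepA (PySem.Dict.empty, 0, "")
  let (d2, c2, inIdx) := Ps_In.foldl pvStepA (d1, c1, "")
  let (_, _, outIdx) := Ps_Out.foldl pvStepA (d2, c2, "")
  mIdx ++ "," ++ inIdx ++ "->" ++ outIdx

-- ===== PORT B =====
def NormalizePattern_alt (Mode_Indices : List Int) (Ps_In : List Int) (Ps_Out : List Int) : String :=
  let concat := Mode_Indices ++ Ps_In ++ Ps_Out
  -- {x: j for j, x in reversed(list(enumerate(concat)))}
  let first : PySem.Dict Int Int :=
    (PySem.List.enumerate concat 0).reverse.foldl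
      (fun d pr => d.insert pr.2 pr.1) PySem.Dict.empty
  let order := PySem.List.sorted first.values (fun x => x) false
  -- {pos: r for r, pos in enumerate(order)}
  let rank : PySem.Dict Int Int :=
    (PySem.List.enumerate order 0).foldl (fun d pr => d.insert pr.2 pr.1) PySem.Dict.empty
  -- rank[first[i]] / first[i]: both keys always present, so getD is exact; ranks are
  -- nonnegative, so .toNat is exact where Python's chr accepts
  let lab := fun (seq : List Int) =>
    String.join (seq.map (fun i =>
      String.singleton (Char.ofNat (65 + rank.getD (first.getD i 0) 0).toNat)))
  lab Mode_Indices ++ "," ++ lab Ps_In ++ "->" ++ lab Ps_Out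

-- ===== PRECONDITION & SPEC =====
def Spec_NormalizePattern (Mode_Indices : List Int) (Ps_In : List Int) (Ps_Out : List Int) (out : String) : Prop := out = NormalizePattern_alt Mode_Indices Ps_In Ps_Out
instance (Mode_Indices : List Int) (Ps_In : List Int) (Ps_Out : List Int) (out : String) : Decidable (Spec_NormalizePattern Mode_Indices Ps_In Ps_Out out) := by unfold Spec_NormalizePattern; infer_instance

-- ===== CLAIM (what is proved, stated in full; the proofs are below) =====
def Claim_equal_NormalizePattern : Prop := ∀ (Mode_Indices : List Int) (Ps_In : List Int) (Ps_Out : List Int), Dom_NormalizePattern Mode_Indices Ps_In Ps_Out → Spec_NormalizePattern Mode_Indices Ps_In Ps_Out (NormalizePattern Mode_Indices Ps_In Ps_Out)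

-- ===== LEMMAS AND PROOFS =====

-- proof-side abbreviation (not part of either port's code): the first-occurrence
-- position of x in concat, as a Python int
def pvFirst (concat : List Int) (x : Int) : Int :=
  (((PySem.List.index? concat x).getD 0 : Nat) : Int)


-- B's table-free analogue used only in the proof: the first-occurrence dedup of concat
-- (pvStepB is the guarded dict insert shared shape of A's three loops)
def pvStepB (d : PySem.Dict Int String) (i : Int) : PySem.Dict Int String :=
  if d.contains i then d else d.insert i (String.singleton (Char.ofNat (65 + d.size)))

theorem pvFoldl_append_str (l : List String) (z : String) :
    l.foldl (fun r s => r ++ s) z = z ++ l.foldl (fun r s => r ++ s) "" := by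
  induction l generalizing z with
  | nil => simp
  | cons a t ih =>
    simp only [List.foldl_cons]
    rw [ih (z ++ a), ih ("" ++ a)]
    simp [String.append_assoc]

theorem pvJoin_cons (v : String) (l : List String) :
    String.join (v :: l) = v ++ String.join l := by
  simp only [String.join, List.foldl_cons]
  rw [pvFoldl_append_str l ("" ++ v)]
  simp

-- the guarded-insert fold never changes an existing binding
theorem pvStepB_get?_mono (L : List Int) (d : PySem.Dict Int String) (k : Int) (v : String)
    (h : d.get? k = some v) : (L.foldl pvStepB d).get? k = some v := by
  induction L generalizing d with
  | nil => exact h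
  | cons i t ih =>
    apply ih
    unfold pvStepB
    split
    · exact h
    · rcases eq_or_ne k i with rfl | hne
      · simp_all [PySem.Dict.contains_eq_isSome_get?]
      · rw [PySem.Dict.get?_insert_of_ne _ _ hne]; exact h

theorem pvStepB_contains_mono (L : List Int) (d : PySem.Dict Int String) (k : Int)
    (h : d.contains k = true) : (L.foldl pvStepB d).contains k = true := by
  rw [PySem.Dict.contains_eq_isSome_get?] at h ⊢
  obtain ⟨v, hv⟩ := Option.isSome_iff_exists.mp h
  rw [pvStepB_get?_mono L d k v hv]; rfl

theorem pvStepB_getD_mono (L : List Int) (d : PySem.Dict Int String) (k : Int)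
    (h : d.contains k = true) : (L.foldl pvStepB d).getD k "" = d.getD k "" := by
  rw [PySem.Dict.contains_eq_isSome_get?] at h
  obtain ⟨v, hv⟩ := Option.isSome_iff_exists.mp h
  rw [PySem.Dict.getD_of_get?_eq_some _ _ hv,
      PySem.Dict.getD_of_get?_eq_some _ _ (pvStepB_get?_mono L d k v hv)]

theorem pvStepB_mem_contains (L : List Int) (d : PySem.Dict Int String) (k : Int)
    (h : k ∈ L) : (L.foldl pvStepB d).contains k = true := by
  induction L generalizing d with
  | nil => cases h
  | cons i t ih =>
    simp only [List.foldl_cons]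
    rcases List.mem_cons.mp h with rfl | hm
    · refine pvStepB_contains_mono t (pvStepB d k) k ?_
      unfold pvStepB
      split
      · assumption
      · exact PySem.Dict.contains_insert_self _ _ _
    · exact ih _ hm

-- A's fold, started consistently (counter = table size), is the table fold plus the
-- segment emitted by looking each element up in the table as it stands after this list
theorem pvFoldA_eq (L : List Int) (d : PySem.Dict Int String) (s : String) :
    L.foldl pvStepA (d, d.size, s)
      = (L.foldl pvStepB d, (L.foldl pvStepB d).size,
         s ++ String.join (L.map (fun i => (L.foldl pvStepB d).getD i ""))) := by
  induction L generalizing d s with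
  | nil => simp [String.join]
  | cons i t ih =>
    by_cases hc : d.contains i = true
    · have hB : pvStepB d i = d := by unfold pvStepB; simp [hc]
      have hA : pvStepA (d, d.size, s) i = (d, d.size, s ++ d.getD i "") := by
        unfold pvStepA; simp [hc]
      have hfold : (i :: t).foldl pvStepB d = t.foldl pvStepB d := by
        simp only [List.foldl_cons, hB]
      rw [List.foldl_cons, hA, ih, hfold, List.map_cons, pvJoin_cons]
      have hget : (List.foldl pvStepB d t).getD i "" = d.getD i "" :=
        pvStepB_getD_mono t d i hc
      rw [hget, String.append_assoc]
    · have hc' : d.contains i = false := by simpa using hc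
      have hB : pvStepB d i = d.insert i (String.singleton (Char.ofNat (65 + d.size))) := by
        unfold pvStepB; simp [hc']
      have hA : pvStepA (d, d.size, s) i
          = (d.insert i (String.singleton (Char.ofNat (65 + d.size))), d.size + 1,
             s ++ (d.insert i (String.singleton (Char.ofNat (65 + d.size)))).getD i "") := by
        unfold pvStepA; simp [hc']
      have hsize : (d.insert i (String.singleton (Char.ofNat (65 + d.size)))).size
          = d.size + 1 := by
        rw [PySem.Dict.size_insert]; simp [hc']
      have hfold : (i :: t).foldl pvStepB d
          = t.foldl pvStepB (d.insert i (String.singleton (Char.ofNat (65 + d.size)))) := by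
        simp only [List.foldl_cons, hB]
      rw [List.foldl_cons, hA, ← hsize, ih, hfold, List.map_cons, pvJoin_cons]
      have hget : (List.foldl pvStepB (d.insert i (String.singleton (Char.ofNat (65 + d.size)))) t).getD i ""
          = String.singleton (Char.ofNat (65 + d.size)) := by
        rw [pvStepB_getD_mono t _ i (PySem.Dict.contains_insert_self _ _ _),
            PySem.Dict.getD_insert_self]
      rw [hget, PySem.Dict.getD_insert_self, String.append_assoc]

-- a segment's lookups are unchanged once every element of the segment is in the table
theorem pvEmit_stable (L L' : List Int) (d : PySem.Dict Int String)
    (h : ∀ i ∈ L, d.contains i = true) :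
    L.map (fun i => (L'.foldl pvStepB d).getD i "") = L.map (fun i => d.getD i "") :=
  List.map_congr_left (fun i hi => pvStepB_getD_mono L' d i (h i hi))

-- the dict built by the guarded fold binds x to the letter of x's rank in the dedup
theorem pvDict_char (L : List Int) (d : PySem.Dict Int String) (u : List Int)
    (hget : ∀ x, d.get? x
      = (PySem.List.index? u x).map (fun k => String.singleton (Char.ofNat (65 + k))))
    (hsz : d.size = u.length) :
    (∀ x, (L.foldl pvStepB d).get? x
      = (PySem.List.index? (L.foldl PySem.Set.add u) x).map
          (fun k => String.singleton (Char.ofNat (65 + k)))) ∧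
    (L.foldl pvStepB d).size = (L.foldl PySem.Set.add u).length := by
  induction L generalizing d u with
  | nil => exact ⟨hget, hsz⟩
  | cons i t ih =>
    simp only [List.foldl_cons]
    by_cases hm : i ∈ u
    · have hc : d.contains i = true := by
        rw [PySem.Dict.contains_eq_isSome_get?, hget]
        simp [hm]
      have hB : pvStepB d i = d := by unfold pvStepB; simp [hc]
      have hu : PySem.Set.add u i = u := by simp [PySem.Set.add, PySem.Set.contains, hm]
      rw [hB, hu]; exact ih d u hget hsz
    · have hc : d.contains i = false := by
        rw [PySem.Dict.contains_eq_isSome_get?, hget,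
            (PySem.List.index?_eq_none_iff u i).mpr hm]
        rfl
      have hB : pvStepB d i = d.insert i (String.singleton (Char.ofNat (65 + d.size))) := by
        unfold pvStepB; simp [hc]
      have hu : PySem.Set.add u i = u ++ [i] := by
        simp [PySem.Set.add, PySem.Set.contains, hm]
      rw [hB, hu]
      refine ih _ _ ?_ ?_
      · intro x
        by_cases hxi : x = i
        · subst hxi
          rw [PySem.Dict.get?_insert_self, PySem.List.index?_append_singleton_self u x hm, hsz]
          rfl
        · have hne : x ≠ i := hxi
          rw [PySem.Dict.get?_insert_of_ne _ _ hne]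
          by_cases hxu : x ∈ u
          · rw [hget, PySem.List.index?_append_of_mem _ hxu]
          · rw [hget, (PySem.List.index?_eq_none_iff u x).mpr hxu,
                (PySem.List.index?_eq_none_iff (u ++ [i]) x).mpr (by simp [hxu, hne])]
      · rw [PySem.Dict.size_insert, hc]
        simp [hsz]

-- rank of a first occurrence is below the list length
theorem pvFirst_lt (P : List Int) (a : Int) (h : a ∈ P) : pvFirst P a < (P.length : Int) := by
  obtain ⟨k, hk⟩ := Option.isSome_iff_exists.mp ((PySem.List.index?_isSome_iff P a).mpr h)
  obtain ⟨hlt, -, -⟩ := PySem.List.getElem_of_index?_eq_some hk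
  unfold pvFirst
  rw [hk]
  exact_mod_cast hlt

-- the dedup of P lists elements in strictly increasing first-occurrence position
theorem pvDedup_pairwise (P : List Int) :
    (PySem.Set.ofList P).Pairwise (fun a b => pvFirst P a < pvFirst P b) := by
  induction P using List.reverseRecOn with
  | nil => simp [PySem.Set.ofList]
  | append_singleton t x ih =>
    have hofl : ∀ (l : List Int), PySem.Set.ofList l = l.foldl PySem.Set.add [] :=
      fun l => PySem.Set.ofList_eq_foldl l
    have hstep : PySem.Set.ofList (t ++ [x]) = PySem.Set.add (PySem.Set.ofList t) x := by
      rw [hofl, hofl, List.foldl_append]; rfl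
    have hfix : ∀ a, a ∈ t → pvFirst (t ++ [x]) a = pvFirst t a := by
      intro a ha
      unfold pvFirst
      rw [PySem.List.index?_append_of_mem _ ha]
    by_cases hm : x ∈ t
    · have : PySem.Set.add (PySem.Set.ofList t) x = PySem.Set.ofList t := by
        simp [PySem.Set.add, PySem.Set.contains, PySem.Set.mem_ofList, hm]
      rw [hstep, this]
      refine ih.imp_of_mem ?_
      intro a b ha hb h
      have ha' := (PySem.Set.mem_ofList _ _).mp ha
      have hb' := (PySem.Set.mem_ofList _ _).mp hb
      rwa [hfix a ha', hfix b hb']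
    · have hadd : PySem.Set.add (PySem.Set.ofList t) x = PySem.Set.ofList t ++ [x] := by
        simp [PySem.Set.add, PySem.Set.contains, PySem.Set.mem_ofList, hm]
      rw [hstep, hadd]
      rw [List.pairwise_append]
      refine ⟨?_, List.pairwise_singleton _ _, ?_⟩
      · refine ih.imp_of_mem ?_
        intro a b ha hb h
        have ha' := (PySem.Set.mem_ofList _ _).mp ha
        have hb' := (PySem.Set.mem_ofList _ _).mp hb
        rwa [hfix a ha', hfix b hb']
      · intro a ha b hb
        have ha' := (PySem.Set.mem_ofList _ _).mp ha
        rw [List.mem_singleton] at hb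
        have h2 : pvFirst (t ++ [x]) x = (t.length : Int) := by
          unfold pvFirst
          rw [PySem.List.index?_append_singleton_self t x hm]
          rfl
        rw [hb, hfix a ha', h2]
        exact pvFirst_lt t a ha'
-- a fold of key ↦ value inserts over (value, key) pairs: the LAST pair with the key wins
theorem pvLastIns (L : List (Int × Int)) (d : PySem.Dict Int Int) (p : Int) :
    (L.foldl (fun d pr => d.insert pr.2 pr.1) d).get? p
      = ((L.reverse.find? (fun pr => pr.2 == p)).map (·.1)).or (d.get? p) := by
  induction L generalizing d with
  | nil => simp
  | cons pr t ih =>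
    rw [List.foldl_cons, ih, List.reverse_cons, List.find?_append]
    cases h : t.reverse.find? (fun pr => pr.2 == p) with
    | some q => simp
    | none =>
      cases hb : pr.2 == p with
      | true =>
        have hpp : pr.2 = p := by simpa using hb
        simp [List.find?, hpp, PySem.Dict.get?_insert_self]
      | false =>
        have hpp : p ≠ pr.2 := fun e => by simp [e] at hb
        simp [List.find?, hb, PySem.Dict.get?_insert_of_ne _ _ hpp]

-- the first enumerate pair holding p carries p's first index
theorem pvFindEnum (l : List Int) (s : Int) (p : Int) :
    (PySem.List.enumerate l s).find? (fun pr => pr.2 == p)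
      = (PySem.List.index? l p).map (fun k => ((k : Int) + s, p)) := by
  induction l generalizing s with
  | nil => simp [PySem.List.enumerate]
  | cons a t ih =>
    have hstep : PySem.List.enumerate (a :: t) s = (s, a) :: PySem.List.enumerate t (s + 1) := rfl
    rw [hstep]
    by_cases hap : a = p
    · subst hap
      rw [PySem.List.index?_cons_self]
      simp [List.find?]
    · have hb : (a == p) = false := by simpa using hap
      rw [PySem.List.index?_cons_of_ne _ hap]
      simp only [List.find?, hb]
      rw [ih (s + 1)]
      cases PySem.List.index? t p with
      | none => simp
      | some r => simp; omega

theorem pvEnumSnd (l : List Int) (s : Int) :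
    (PySem.List.enumerate l s).map (·.2) = l := by
  induction l generalizing s with
  | nil => rfl
  | cons a t ih =>
    have hstep : PySem.List.enumerate (a :: t) s = (s, a) :: PySem.List.enumerate t (s + 1) := rfl
    rw [hstep, List.map_cons, ih (s + 1)]

-- B's first dict: lookup is the first-occurrence position on concat, absent elsewhere
theorem pvFirstD_get? (concat : List Int) (p : Int) :
    ((PySem.List.enumerate concat 0).reverse.foldl
        (fun d pr => d.insert pr.2 pr.1) PySem.Dict.empty).get? p
      = if p ∈ concat then some (pvFirst concat p) else none := by
  rw [pvLastIns, List.reverse_reverse, pvFindEnum, PySem.Dict.get?_empty]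
  by_cases hp : p ∈ concat
  · obtain ⟨k, hk⟩ := Option.isSome_iff_exists.mp ((PySem.List.index?_isSome_iff concat p).mpr hp)
    unfold pvFirst
    rw [hk]
    simp [hp]
  · rw [(PySem.List.index?_eq_none_iff concat p).mpr hp]
    simp [hp]

-- B's first.values is a permutation of the dedup's first positions
theorem pvValuesPerm (concat : List Int) :
    ((PySem.Set.ofList concat).map (pvFirst concat)).Perm
      ((PySem.List.enumerate concat 0).reverse.foldl
        (fun d pr => d.insert pr.2 pr.1) PySem.Dict.empty).values := by
  have hkeys : ((PySem.List.enumerate concat 0).reverse.foldl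
      (fun d pr => d.insert pr.2 pr.1) PySem.Dict.empty).keys
      = PySem.Set.ofList ((PySem.List.enumerate concat 0).reverse.map (·.2)) := by
    rw [PySem.Dict.keys_foldl_insert_key ((PySem.List.enumerate concat 0).reverse)
          (fun (pr : Int × Int) => pr.2) (fun _ pr => pr.1) PySem.Dict.empty,
        PySem.Set.ofList_eq_foldl]
    rfl
  have hkmem : ∀ x, x ∈ ((PySem.List.enumerate concat 0).reverse.map (·.2) : List Int)
      ↔ x ∈ concat := by
    intro x
    rw [List.map_reverse, List.mem_reverse, pvEnumSnd]
  have hknd : ((PySem.List.enumerate concat 0).reverse.foldl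
      (fun d pr => d.insert pr.2 pr.1) PySem.Dict.empty).keys.Nodup := by
    rw [hkeys]; exact PySem.Set.nodup_ofList _
  rw [PySem.Dict.values_eq_map_keys _ hknd 0, hkeys]
  -- both sides are pvFirst-images of nodup lists with the same members
  have hmap : (PySem.Set.ofList ((PySem.List.enumerate concat 0).reverse.map (·.2))).map
      (fun k => ((PySem.List.enumerate concat 0).reverse.foldl
        (fun d pr => d.insert pr.2 pr.1) PySem.Dict.empty).getD k 0)
      = (PySem.Set.ofList ((PySem.List.enumerate concat 0).reverse.map (·.2))).map
        (pvFirst concat) := by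
    refine List.map_congr_left ?_
    intro x hx
    have hxc : x ∈ concat := (hkmem x).mp ((PySem.Set.mem_ofList _ _).mp hx)
    rw [PySem.Dict.getD_eq_get?_getD, pvFirstD_get?, if_pos hxc]
    rfl
  rw [hmap]
  refine List.Perm.map _ (List.perm_of_nodup_nodup_toFinset_eq
    (PySem.Set.nodup_ofList _) (PySem.Set.nodup_ofList _) ?_)
  ext y
  simp [PySem.Set.mem_ofList]

-- B's sorted first.values IS the dedup mapped through pvFirst (strictly increasing)
theorem pvOrder_eq (concat : List Int) :
    PySem.List.sorted
        ((PySem.List.enumerate concat 0).reverse.foldl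
          (fun d pr => d.insert pr.2 pr.1) PySem.Dict.empty).values
        (fun x => x) false
      = (PySem.Set.ofList concat).map (pvFirst concat) := by
  have hpw : ((PySem.Set.ofList concat).map (pvFirst concat)).Pairwise (· < ·) :=
    List.pairwise_map.mpr (pvDedup_pairwise concat)
  exact PySem.List.sorted_eq_of_perm_of_pairwise_lt _ _ _ (pvValuesPerm concat) hpw

-- rank of pvFirst i in the mapped dedup = rank of i in the dedup (pvFirst strictly increasing)
theorem pvIndex?_map (u : List Int) (f : Int → Int) (i : Int)
    (hpw : u.Pairwise (fun a b => f a < f b)) (hm : i ∈ u) :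
    PySem.List.index? (u.map f) (f i) = PySem.List.index? u i := by
  induction u with
  | nil => cases hm
  | cons a t ih =>
    rcases eq_or_ne a i with rfl | hne
    · rw [List.map_cons, PySem.List.index?_cons_self, PySem.List.index?_cons_self]
    · have hit : i ∈ t := by rcases List.mem_cons.mp hm with h | h; exact absurd h.symm hne; exact h
      have hfa : f a ≠ f i := ne_of_lt ((List.pairwise_cons.mp hpw).1 i hit)
      rw [List.map_cons, PySem.List.index?_cons_of_ne _ hfa, PySem.List.index?_cons_of_ne _ hne,
          ih (List.pairwise_cons.mp hpw).2 hit]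

-- the rank dict {pos: r for r, pos in enumerate(l, s)} over distinct keys:
-- lookup is the index in l, shifted by s
theorem pvRank_get? (l : List Int) (s : Int) (d : PySem.Dict Int Int) (p : Int)
    (hnd : l.Nodup) :
    ((PySem.List.enumerate l s).foldl (fun d pr => d.insert pr.2 pr.1) d).get? p
      = if p ∈ l then (PySem.List.index? l p).map (fun r => (r : Int) + s) else d.get? p := by
  induction l generalizing s d with
  | nil => simp [PySem.List.enumerate]
  | cons a t ih =>
    have hat : a ∉ t := (List.nodup_cons.mp hnd).1
    have hndt : t.Nodup := (List.nodup_cons.mp hnd).2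
    have hstep : PySem.List.enumerate (a :: t) s = (s, a) :: PySem.List.enumerate t (s + 1) := rfl
    rw [hstep, List.foldl_cons, ih _ _ hndt]
    by_cases hpa : p = a
    · subst hpa
      rw [PySem.List.index?_cons_self]
      simp [hat, PySem.Dict.get?_insert_self]
    · have hpa' : a ≠ p := fun e => hpa e.symm
      rw [PySem.List.index?_cons_of_ne _ hpa']
      by_cases hpt : p ∈ t
      · obtain ⟨r, hr⟩ := Option.isSome_iff_exists.mp
          ((PySem.List.index?_isSome_iff t p).mpr hpt)
        rw [hr]
        simp [hpt]
        omega
      · rw [(PySem.List.index?_eq_none_iff t p).mpr hpt]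
        simp [hpt, hpa, PySem.Dict.get?_insert_of_ne _ _ hpa]

-- B's character for i: rank[first[i]] is exactly i's rank k in the dedup
theorem pvB_char (concat : List Int) (i : Int) (k : Nat)
    (hic : i ∈ concat)
    (hk : PySem.List.index? (PySem.Set.ofList concat) i = some k) :
    (65 + ((PySem.List.enumerate (PySem.List.sorted
        ((PySem.List.enumerate concat 0).reverse.foldl
          (fun d pr => d.insert pr.2 pr.1) PySem.Dict.empty).values
        (fun x => x) false) 0).foldl
        (fun d pr => d.insert pr.2 pr.1) PySem.Dict.empty).getD
        (((PySem.List.enumerate concat 0).reverse.foldl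
          (fun d pr => d.insert pr.2 pr.1) PySem.Dict.empty).getD i 0) 0).toNat
      = 65 + k := by
  have hiU : i ∈ PySem.Set.ofList concat := (PySem.Set.mem_ofList _ _).mpr hic
  have hfD : ((PySem.List.enumerate concat 0).reverse.foldl
      (fun d pr => d.insert pr.2 pr.1) PySem.Dict.empty).getD i 0
      = pvFirst concat i := by
    rw [PySem.Dict.getD_eq_get?_getD, pvFirstD_get?, if_pos hic]
    rfl
  have hnd : ((PySem.Set.ofList concat).map (pvFirst concat)).Nodup :=
    (List.pairwise_map.mpr (pvDedup_pairwise concat)).imp (fun h => ne_of_lt h)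
  rw [hfD, pvOrder_eq concat, PySem.Dict.getD_eq_get?_getD, pvRank_get? _ _ _ _ hnd]
  have hmem : pvFirst concat i ∈ (PySem.Set.ofList concat).map (pvFirst concat) :=
    List.mem_map_of_mem hiU
  rw [if_pos hmem, pvIndex?_map _ _ _ (pvDedup_pairwise concat) hiU, hk]
  simp
  omega

set_option maxHeartbeats 4000000 in
theorem NormalizePattern_eq_alt (M I O : List Int) :
    NormalizePattern M I O = NormalizePattern_alt M I O := by
  unfold NormalizePattern NormalizePattern_alt
  have h0 : (PySem.Dict.empty : PySem.Dict Int String).size = 0 := rfl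
  set concat := M ++ I ++ O with hcat
  set d1 := M.foldl pvStepB (PySem.Dict.empty : PySem.Dict Int String) with hd1
  set d2 := I.foldl pvStepB d1 with hd2
  set d3 := O.foldl pvStepB d2 with hd3
  have e1 := pvFoldA_eq M (PySem.Dict.empty : PySem.Dict Int String) ""
  rw [h0] at e1
  have e2 := pvFoldA_eq I d1 ""
  have e3 := pvFoldA_eq O d2 ""
  rw [e1]; simp only [← hd1]
  rw [e2]; simp only [← hd2]
  rw [e3]; simp only [← hd3]
  -- every segment looks up in the final dict d3
  have hM : M.map (fun i => d1.getD i "") = M.map (fun i => d3.getD i "") := by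
    rw [hd3, hd2, ← List.foldl_append]
    exact (pvEmit_stable M (I ++ O) d1 (fun i hi => pvStepB_mem_contains M _ i hi)).symm
  have hI : I.map (fun i => d2.getD i "") = I.map (fun i => d3.getD i "") := by
    rw [hd3]
    exact (pvEmit_stable I O d2 (fun i hi => pvStepB_mem_contains I d1 i hi)).symm
  rw [hM, hI]
  -- d3 is the guarded fold over the whole concat; its letters are the dedup ranks
  have hda : d3 = concat.foldl pvStepB PySem.Dict.empty := by
    rw [hd3, hd2, hd1, hcat, List.foldl_append, List.foldl_append]
  have hdict := pvDict_char concat (PySem.Dict.empty : PySem.Dict Int String) []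
    (fun x => by rw [PySem.Dict.get?_empty]; rfl) rfl
  have hd3get : ∀ x, d3.get? x
      = (PySem.List.index? (PySem.Set.ofList concat) x).map
          (fun k => String.singleton (Char.ofNat (65 + k))) := by
    intro x
    rw [hda, hdict.1 x, PySem.Set.ofList_eq_foldl]
  -- each segment equals B's segment
  have hseg : ∀ (L : List Int), (∀ i ∈ L, i ∈ concat) →
      String.join (L.map (fun i => d3.getD i ""))
        = String.join (L.map (fun i => String.singleton (Char.ofNat
            (65 + ((PySem.List.enumerate (PySem.List.sorted
              ((PySem.List.enumerate concat 0).reverse.foldl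
                (fun d pr => d.insert pr.2 pr.1) PySem.Dict.empty).values
              (fun x => x) false) 0).foldl
              (fun d pr => d.insert pr.2 pr.1) PySem.Dict.empty).getD
              (((PySem.List.enumerate concat 0).reverse.foldl
                (fun d pr => d.insert pr.2 pr.1) PySem.Dict.empty).getD i 0) 0).toNat))) := by
    intro L hsub
    congr 1
    refine List.map_congr_left ?_
    intro i hi
    have hic : i ∈ concat := hsub i hi
    have hiU : i ∈ PySem.Set.ofList concat := (PySem.Set.mem_ofList _ _).mpr hic
    obtain ⟨k, hk⟩ := Option.isSome_iff_exists.mp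
      ((PySem.List.index?_isSome_iff (PySem.Set.ofList concat) i).mpr hiU)
    have hD : d3.getD i "" = String.singleton (Char.ofNat (65 + k)) := by
      rw [PySem.Dict.getD_of_get?_eq_some _ _ (by rw [hd3get i, hk]; rfl)]
    rw [hD, pvB_char concat i k hic hk]
  rw [hseg M (fun i hi => by simp [hcat, hi]),
      hseg I (fun i hi => by simp [hcat, hi]),
      hseg O (fun i hi => by simp [hcat, hi])]
  simp

-- ===== VERDICT (by name: the statement is the Claim_ definition above) =====
theorem NormalizePattern_spec : Claim_equal_NormalizePattern := by
  intro M I O _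
  show _ = _
  exact NormalizePattern_eq_alt M I O
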